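-- pv_equiv track=rewrite | github.com/rebellions-sw/optimum-rbln | .github/scripts/auto_code_review.py | remove_file_from_diff
-- ===== SOURCE A (Python) =====
-- def remove_file_from_diff(diff_content, file_to_remove):
--     lines = diff_content.splitlines()
--     result = []
--     skip = False
--     file_header = f"diff --git a/{file_to_remove} b/{file_to_remove}"
--
--     for line in lines:
--         if line.startswith("diff --git"):
--             if line == file_header:
--                 skip = True
--             else:
--                 skip = False
--
--         if not skip:
--             result.append(line)
--
--     return "\n".join(result)
-- ===== SOURCE B (Python) =====
-- def remove_file_from_diff(diff_content, file_to_remove):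
--     file_header = f"diff --git a/{file_to_remove} b/{file_to_remove}"
--     # group lines into sections: one leading section, then one per 'diff --git' header
--     sections = []
--     current = []
--     for line in diff_content.splitlines():
--         if line.startswith("diff --git"):
--             sections.append(current)
--             current = [line]
--         else:
--             current.append(line)
--     sections.append(current)
--     kept = [sec for sec in sections if not (sec and sec[0] == file_header)]
--     return "\n".join(line for sec in kept for line in sec)
-- ===== Notes on version B (the rewrite author's own statement) =====
-- stated objective: alternative
-- what changed: B replaces A's per-line skip flag with an explicit sectioned structure: one pass groups lines into sections at each 'diff --git' header, then whole sections whose first line equals the file header are filtered out and the rest concatenated.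
import Mathlib
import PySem

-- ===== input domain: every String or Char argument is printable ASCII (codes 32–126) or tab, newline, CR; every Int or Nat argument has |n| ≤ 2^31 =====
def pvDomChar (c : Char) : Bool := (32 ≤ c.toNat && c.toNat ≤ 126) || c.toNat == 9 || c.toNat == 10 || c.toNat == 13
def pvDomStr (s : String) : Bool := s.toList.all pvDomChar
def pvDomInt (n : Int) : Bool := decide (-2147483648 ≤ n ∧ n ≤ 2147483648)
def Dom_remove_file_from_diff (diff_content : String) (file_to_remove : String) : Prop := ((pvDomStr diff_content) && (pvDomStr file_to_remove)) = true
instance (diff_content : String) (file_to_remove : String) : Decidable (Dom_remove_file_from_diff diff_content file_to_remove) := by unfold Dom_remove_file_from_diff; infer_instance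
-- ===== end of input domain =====

-- B groups the diff lines into sections at each 'diff --git' header and filters out the
-- matching sections whole, instead of A's per-line skip flag (alternative decomposition).


-- ===== PORT A =====
def remove_file_from_diff (diff_content : String) (file_to_remove : String) : String :=
  let lines := PySem.Str.splitlines diff_content
  let file_header := "diff --git a/" ++ file_to_remove ++ " b/" ++ file_to_remove
  let st := lines.foldl (fun (acc : List String × Bool) line =>
    let skip := if PySem.Str.startswith line "diff --git" then (line == file_header) else acc.2
    (if skip then acc.1 else acc.1 ++ [line], skip)) ([], false)
  PySem.Str.join "\n" st.1

-- ===== PORT B =====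
def remove_file_from_diff_alt (diff_content : String) (file_to_remove : String) : String :=
  let file_header := "diff --git a/" ++ file_to_remove ++ " b/" ++ file_to_remove
  let st := (PySem.Str.splitlines diff_content).foldl
    (fun (st : List (List String) × List String) line =>
      if PySem.Str.startswith line "diff --git" then (st.1 ++ [st.2], [line])
      else (st.1, st.2 ++ [line])) ([], [])
  let sections := st.1 ++ [st.2]
  let kept := sections.filter (fun sec =>
    match sec with
    | [] => true
    | h :: _ => !(h == file_header))
  PySem.Str.join "\n" (kept.flatMap id)

-- ===== PRECONDITION & SPEC =====
def Spec_remove_file_from_diff (diff_content : String) (file_to_remove : String) (out : String) : Prop := out = remove_file_from_diff_alt diff_content file_to_remove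
instance (diff_content : String) (file_to_remove : String) (out : String) : Decidable (Spec_remove_file_from_diff diff_content file_to_remove out) := by unfold Spec_remove_file_from_diff; infer_instance

-- ===== CLAIM (what is proved, stated in full; the proofs are below) =====
def Claim_equal_remove_file_from_diff : Prop := ∀ (diff_content : String) (file_to_remove : String), Dom_remove_file_from_diff diff_content file_to_remove → Spec_remove_file_from_diff diff_content file_to_remove (remove_file_from_diff diff_content file_to_remove)

-- ===== LEMMAS AND PROOFS =====

-- section kept iff empty (the leading section) or its head is not the file header
def pvKeep (header : String) (sec : List String) : Bool :=
  match sec with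
  | [] => true
  | h :: _ => !(h == header)

-- the file header does start with "diff --git"
lemma pv_header_startswith (f : String) :
    PySem.Str.startswith ("diff --git a/" ++ f ++ " b/" ++ f) "diff --git" = true := by
  rw [PySem.Str.startswith_eq, PySem.Chars.startswith_iff]
  simp only [String.toList_append]
  exact (((by decide : ("diff --git".toList <+: "diff --git a/".toList)).trans
    (List.prefix_append _ _)).trans (List.prefix_append _ _)).trans (List.prefix_append _ _)

-- a closed section appended to the pool: its kept lines join at the end of the flattening
lemma pv_flat (header : String) (ss : List (List String)) (cur : List String) :
    ((ss ++ [cur]).filter (pvKeep header)).flatMap id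
      = ((ss.filter (pvKeep header)).flatMap id)
        ++ (if pvKeep header cur = true then cur else []) := by
  rw [List.filter_append, List.flatMap_append]
  congr 1
  by_cases hk : pvKeep header cur = true
  · simp [hk]
  · simp [hk]

-- loop invariant: A's fold state corresponds to the flattening of B's kept sections
lemma pv_inv (header : String) (hH : PySem.Str.startswith header "diff --git" = true)
    (lines : List String) :
    ∀ (ss : List (List String)) (cur : List String),
    (lines.foldl (fun (acc : List String × Bool) line =>
        let skip := if PySem.Str.startswith line "diff --git" then (line == header) else acc.2
        (if skip then acc.1 else acc.1 ++ [line], skip))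
      (((ss.filter (pvKeep header)).flatMap id) ++ (if pvKeep header cur = true then cur else []),
        !pvKeep header cur)).1
    = ((((lines.foldl (fun (st : List (List String) × List String) line =>
          if PySem.Str.startswith line "diff --git" then (st.1 ++ [st.2], [line])
          else (st.1, st.2 ++ [line])) (ss, cur)).1
        ++ [(lines.foldl (fun (st : List (List String) × List String) line =>
          if PySem.Str.startswith line "diff --git" then (st.1 ++ [st.2], [line])
          else (st.1, st.2 ++ [line])) (ss, cur)).2]).filter (pvKeep header)).flatMap id) := by
  induction lines with
  | nil =>
    intro ss cur
    simpa using (pv_flat header ss cur).symm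
  | cons line rest ih =>
    intro ss cur
    by_cases hs : PySem.Str.startswith line "diff --git" = true
    · -- header line: B closes cur and opens [line]; A sets skip := (line == header)
      simp only [List.foldl_cons, hs, if_true]
      have h2 := ih (ss ++ [cur]) [line]
      rw [pv_flat header ss cur] at h2
      have hk : pvKeep header [line] = !(line == header) := by simp [pvKeep]
      rw [hk] at h2
      by_cases he : (line == header) = true
      · simpa [he] using h2
      · simpa [he] using h2
    · -- ordinary line: B appends to cur; the keep-status of cur is unchanged
      simp only [List.foldl_cons, hs, if_false, Bool.false_eq_true]
      have hkeq : pvKeep header (cur ++ [line]) = pvKeep header cur := by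
        cases cur with
        | nil =>
          have hne : (line == header) = false := by
            by_cases h : line = header
            · subst h; exact absurd hH hs
            · simpa using h
          simp [pvKeep, hne]
        | cons h t => simp [pvKeep]
      have h2 := ih ss (cur ++ [line])
      rw [hkeq] at h2
      by_cases hk : pvKeep header cur = true
      · simpa [hk] using h2
      · simp only [Bool.not_eq_true] at hk
        simpa [hk] using h2

theorem pv_main (diff_content file_to_remove : String) :
    remove_file_from_diff diff_content file_to_remove
      = remove_file_from_diff_alt diff_content file_to_remove := by
  unfold remove_file_from_diff remove_file_from_diff_alt
  have h := pv_inv ("diff --git a/" ++ file_to_remove ++ " b/" ++ file_to_remove)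
    (pv_header_startswith file_to_remove) (PySem.Str.splitlines diff_content) [] []
  simp only [List.filter_nil, List.flatMap_nil, List.nil_append, pvKeep, if_true,
    Bool.not_true] at h
  exact congrArg (PySem.Str.join "\n") h

-- ===== VERDICT (by name: the statement is the Claim_ definition above) =====
theorem remove_file_from_diff_spec : Claim_equal_remove_file_from_diff := by
  intro d f _
  unfold Spec_remove_file_from_diff
  exact pv_main d f
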